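-- pv_equiv track=rewrite | github.com/JelleZijlstra/hesperomys | schema_report.py | build_groupings
-- ===== SOURCE A (Python) =====
-- TYPE_EXACT_EXCLUDE = {"PageInfo"}
--
-- TYPE_SUFFIX_EXCLUDE = ("Connection", "Edge")
--
-- def type_allowed(t: str) -> bool:
--     if t in TYPE_EXACT_EXCLUDE:
--         return False
--     if any(t.endswith(suf) for suf in TYPE_SUFFIX_EXCLUDE):
--         return False
--     return True
--
-- def build_groupings(
--     interfaces: set[str],
--     obj_types: dict[str, list[str]],
--     type_interfaces: dict[str, list[str]],
-- ) -> tuple[dict[str, list[str]], list[str]]: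
--     interfaces_sorted = sorted(interfaces)
--     by_interface: dict[str, list[str]] = {iface: [] for iface in interfaces_sorted}
--     no_interface: list[str] = []
--     for t in sorted([t for t in obj_types if type_allowed(t)]):
--         impls = [i for i in type_interfaces.get(t, []) if i in interfaces]
--         if impls:
--             for i in impls:
--                 by_interface.setdefault(i, []).append(t)
--         else:
--             no_interface.append(t)
--     return by_interface, no_interface
-- ===== SOURCE B (Python) =====
-- TYPE_EXACT_EXCLUDE = {"PageInfo"}
--
-- TYPE_SUFFIX_EXCLUDE = ("Connection", "Edge")
--
--
-- def build_groupings(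
--     interfaces: "set[str]",
--     obj_types: "dict[str, list[str]]",
--     type_interfaces: "dict[str, list[str]]",
-- ) -> "tuple[dict[str, list[str]], list[str]]":
--     types_sorted = sorted(
--         t
--         for t in obj_types
--         if t not in TYPE_EXACT_EXCLUDE
--         and not any(t.endswith(suf) for suf in TYPE_SUFFIX_EXCLUDE)
--     )
--     by_interface = {
--         iface: [
--             t
--             for t in types_sorted
--             for i in type_interfaces.get(t, [])
--             if i == iface
--         ]
--         for iface in sorted(interfaces)
--     }
--     no_interface = [
--         t
--         for t in types_sorted
--         if not any(i in interfaces for i in type_interfaces.get(t, []))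
--     ]
--     return by_interface, no_interface
-- ===== Notes on version B (the rewrite author's own statement) =====
-- stated objective: alternative
-- what changed: Inverted the loop nesting: instead of A's single distributing pass over the sorted types (mutating a pre-initialised dict bucket by bucket via setdefault/append), B sorts the allowed types once and builds each interface's bucket with its own scan over that sorted list, and no_interface with a separate scan; it trades A's one pass for per-interface scans.
import Mathlib
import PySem

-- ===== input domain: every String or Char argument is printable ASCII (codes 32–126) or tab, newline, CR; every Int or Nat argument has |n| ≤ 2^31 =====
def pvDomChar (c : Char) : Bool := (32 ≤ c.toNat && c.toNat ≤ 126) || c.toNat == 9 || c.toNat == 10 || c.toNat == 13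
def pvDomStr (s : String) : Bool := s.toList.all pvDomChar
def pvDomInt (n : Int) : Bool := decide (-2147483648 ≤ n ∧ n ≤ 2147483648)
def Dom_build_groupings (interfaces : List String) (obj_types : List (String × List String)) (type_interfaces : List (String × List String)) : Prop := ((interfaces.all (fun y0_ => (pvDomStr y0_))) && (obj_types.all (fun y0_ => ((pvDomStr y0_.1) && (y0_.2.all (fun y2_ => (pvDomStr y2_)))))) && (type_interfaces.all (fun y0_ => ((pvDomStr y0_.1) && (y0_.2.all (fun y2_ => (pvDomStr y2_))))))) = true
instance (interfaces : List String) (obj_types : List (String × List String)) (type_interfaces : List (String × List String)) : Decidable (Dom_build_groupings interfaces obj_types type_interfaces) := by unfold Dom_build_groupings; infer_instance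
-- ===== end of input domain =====

-- B inverts A's loop nesting (one scan of the sorted types per interface instead of one
-- distributing pass over types); alternative decomposition, same results.


-- ===== PORT A =====
def type_allowed (t : String) : Bool :=
  if PySem.Set.contains (PySem.Set.ofList ["PageInfo"]) t then false
  else if (["Connection", "Edge"].any (fun suf => PySem.Str.endswith t suf)) then false
  else true

def build_groupings (interfaces : List String) (obj_types : List (String × List String)) (type_interfaces : List (String × List String)) : (List (String × List String)) × List String :=
  let ot := PySem.Dict.ofList obj_types
  let ti := PySem.Dict.ofList type_interfaces
  let interfaces_sorted := PySem.List.sorted interfaces (fun x => x) false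
  let by_interface : PySem.Dict String (List String) :=
    interfaces_sorted.foldl (fun d iface => d.insert iface []) PySem.Dict.empty
  let no_interface : List String := []
  let r := (PySem.List.sorted (ot.keys.filter (fun t => type_allowed t)) (fun x => x) false).foldl
    (fun (acc : PySem.Dict String (List String) × List String) t =>
      let impls := (ti.getD t []).filter (fun i => PySem.Set.contains interfaces i)
      if impls.isEmpty then (acc.1, acc.2 ++ [t])
      else
        -- by_interface.setdefault(i, []).append(t)  ==  d[i] = d.get(i, []) + [t]  (the list object is the dict's value)
        ((impls.foldl (fun d i => d.modify i [] (fun l => l ++ [t])) acc.1), acc.2))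
    (by_interface, no_interface)
  (r.1.items, r.2)

-- ===== PORT B =====
-- the bucket comprehension [t for t in types_sorted for i in type_interfaces.get(t, []) if i == iface]
def bg_bucket (ti : PySem.Dict String (List String)) (types_sorted : List String) (iface : String) : List String :=
  types_sorted.flatMap (fun t => ((ti.getD t []).filter (fun i => i == iface)).map (fun _ => t))

def build_groupings_alt (interfaces : List String) (obj_types : List (String × List String)) (type_interfaces : List (String × List String)) : (List (String × List String)) × List String :=
  let ti := PySem.Dict.ofList type_interfaces
  let types_sorted := PySem.List.sorted
    ((PySem.Dict.ofList obj_types).keys.filter (fun t =>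
      !(PySem.Set.contains (PySem.Set.ofList ["PageInfo"]) t)
        && !(["Connection", "Edge"].any (fun suf => PySem.Str.endswith t suf))))
    (fun x => x) false
  let by_interface : PySem.Dict String (List String) :=
    (PySem.List.sorted interfaces (fun x => x) false).foldl
      (fun d iface => d.insert iface (bg_bucket ti types_sorted iface))
      PySem.Dict.empty
  let no_interface : List String :=
    types_sorted.filter (fun t =>
      !((ti.getD t []).any (fun i => PySem.Set.contains interfaces i)))
  (by_interface.items, no_interface)

-- ===== PRECONDITION & SPEC =====
def Spec_build_groupings (interfaces : List String) (obj_types : List (String × List String)) (type_interfaces : List (String × List String)) (out : (List (String × List String)) × List String) : Prop := out = build_groupings_alt interfaces obj_types type_interfaces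
instance (interfaces : List String) (obj_types : List (String × List String)) (type_interfaces : List (String × List String)) (out : (List (String × List String)) × List String) : Decidable (Spec_build_groupings interfaces obj_types type_interfaces out) := by unfold Spec_build_groupings; infer_instance

-- ===== CLAIM (what is proved, stated in full; the proofs are below) =====
def Claim_equal_build_groupings : Prop := ∀ (interfaces : List String) (obj_types : List (String × List String)) (type_interfaces : List (String × List String)), Dom_build_groupings interfaces obj_types type_interfaces → Spec_build_groupings interfaces obj_types type_interfaces (build_groupings interfaces obj_types type_interfaces)

-- ===== LEMMAS AND PROOFS =====

-- the two filter predicates over type names agree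
theorem type_allowed_eq (t : String) :
    type_allowed t
      = (!(PySem.Set.contains (PySem.Set.ofList ["PageInfo"]) t)
          && !(["Connection", "Edge"].any (fun suf => PySem.Str.endswith t suf))) := by
  unfold type_allowed
  cases hA : PySem.Set.contains (PySem.Set.ofList ["PageInfo"]) t <;>
    cases hB : (["Connection", "Edge"].any (fun suf => PySem.Str.endswith t suf)) <;>
      simp_all

-- find? on an association list with nodup keys returns the (unique) matching entry
theorem find?_eq_of_mem_of_nodup (items : List (String × List String)) (p : String × List String)
    (hmem : p ∈ items) (hnd : (items.map Prod.fst).Nodup) :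
    items.find? (fun q => q.1 == p.1) = some p := by
  induction items with
  | nil => cases hmem
  | cons q rest ih =>
    simp only [List.map_cons, List.nodup_cons] at hnd
    rcases List.mem_cons.mp hmem with h | h
    · subst h; simp [List.find?]
    · have hne : ¬ (q.1 == p.1) = true := by
        intro hbe
        exact hnd.1 (by
          have : q.1 = p.1 := by simpa using hbe
          rw [this]; exact List.mem_map.mpr ⟨p, h, rfl⟩)
      simp [List.find?, hne, ih h hnd.2]

-- one setdefault/append step on a contained key, as a map over the items
theorem modify_items (d : PySem.Dict String (List String)) (k : String)
    (f : List String → List String)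
    (hnd : (d.items.map Prod.fst).Nodup) (hc : d.contains k = true) :
    (d.modify k [] f).items
      = d.items.map (fun p => if p.1 == k then (p.1, f p.2) else p) := by
  unfold PySem.Dict.modify PySem.Dict.insert
  rw [if_pos hc]
  apply List.map_congr_left
  intro p hp
  by_cases hbe : (p.1 == k) = true
  · have hk : p.1 = k := by simpa using hbe
    have hfind : d.items.find? (fun q => q.1 == p.1) = some p :=
      find?_eq_of_mem_of_nodup d.items p hp hnd
    have : d.getD k [] = p.2 := by
      unfold PySem.Dict.getD PySem.Dict.get?
      rw [← hk, hfind]; rfl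
    simp [this, hk]
  · simp [hbe]

theorem map_fst_modify (d : PySem.Dict String (List String)) (k : String)
    (f : List String → List String)
    (hnd : (d.items.map Prod.fst).Nodup) (hc : d.contains k = true) :
    (d.modify k [] f).items.map Prod.fst = d.items.map Prod.fst := by
  rw [modify_items d k f hnd hc, List.map_map]
  apply List.map_congr_left
  intro p _
  by_cases h : p.1 = k <;> simp [h]

theorem contains_eq_of_map_fst {d e : PySem.Dict String (List String)}
    (h : d.items.map Prod.fst = e.items.map Prod.fst) (k : String) :
    d.contains k = e.contains k := by
  unfold PySem.Dict.contains
  have : ∀ (l : List (String × List String)),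
      (l.any fun p => p.1 == k) = (l.map Prod.fst).any (fun x => x == k) := by
    intro l; simp [List.any_map]; rfl
  rw [this, this, h]

-- the inner  for i in impls: by_interface.setdefault(i, []).append(t)  loop
theorem inner_fold (t : String) (is : List String) :
    ∀ (d : PySem.Dict String (List String)),
    (d.items.map Prod.fst).Nodup → (∀ i ∈ is, d.contains i = true) →
    (is.foldl (fun d i => d.modify i [] (fun l => l ++ [t])) d).items
      = d.items.map (fun p => (p.1, p.2 ++ ((is.filter (fun i => i == p.1)).map (fun _ => t)))) := by
  induction is with
  | nil => intro d _ _; simp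
  | cons i rest ih =>
    intro d hnd hc
    have hci : d.contains i = true := hc i (List.mem_cons_self ..)
    have hfst := map_fst_modify d i (fun l => l ++ [t]) hnd hci
    have hnd' : ((d.modify i [] (fun l => l ++ [t])).items.map Prod.fst).Nodup := by
      rw [hfst]; exact hnd
    have hc' : ∀ j ∈ rest, (d.modify i [] (fun l => l ++ [t])).contains j = true := by
      intro j hj
      rw [contains_eq_of_map_fst hfst]
      exact hc j (List.mem_cons_of_mem _ hj)
    rw [List.foldl_cons, ih _ hnd' hc', modify_items d i (fun l => l ++ [t]) hnd hci,
      List.map_map]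
    apply List.map_congr_left
    intro p _
    by_cases h : p.1 = i
    · have hbe : (p.1 == i) = true := by simp [h]
      have hbe' : (i == p.1) = true := by simp [h]
      simp [Function.comp, hbe, hbe', List.append_assoc]
    · have hbe : (p.1 == i) = false := by simp [h]
      have hbe' : (i == p.1) = false := by simp; exact fun hh => h hh.symm
      simp [Function.comp, hbe, hbe']

theorem bg_bucket_cons (ti : PySem.Dict String (List String)) (t : String) (ts : List String) (k : String) :
    bg_bucket ti (t :: ts) k
      = ((ti.getD t []).filter (fun i => i == k)).map (fun _ => t) ++ bg_bucket ti ts k := by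
  simp [bg_bucket]

theorem filter_beq_filter (interfaces : List String) (l : List String) (k : String)
    (hk : PySem.Set.contains interfaces k = true) :
    (l.filter (fun i => PySem.Set.contains interfaces i)).filter (fun i => i == k)
      = l.filter (fun i => i == k) := by
  induction l with
  | nil => rfl
  | cons a l ih =>
    rw [List.filter_cons]
    by_cases hca : PySem.Set.contains interfaces a = true
    · rw [if_pos hca, List.filter_cons, ih, List.filter_cons]
    · rw [if_neg hca, ih, List.filter_cons]
      have hak : (a == k) = false := by
        by_contra hh
        have : a = k := by
          have : (a == k) = true := by
            cases hab : (a == k)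
            · exact absurd hab hh
            · rfl
          simpa using this
        rw [this, hk] at hca
        exact hca rfl
      rw [if_neg (by simp [hak])]

theorem map_fst_insert (d : PySem.Dict String (List String)) (i : String) (v : List String) :
    (d.insert i v).items.map Prod.fst
      = if d.contains i then d.items.map Prod.fst else d.items.map Prod.fst ++ [i] := by
  unfold PySem.Dict.insert
  by_cases hc : d.contains i = true
  · rw [if_pos hc, if_pos hc]
    simp only [List.map_map]
    apply List.map_congr_left
    intro p _
    by_cases h : p.1 = i <;> simp [h]
  · rw [if_neg hc, if_neg hc]
    simp

theorem contains_foldl_insert (g : String → List String) (xs : List String) :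
    ∀ (d : PySem.Dict String (List String)) (k : String),
    (xs.foldl (fun d i => d.insert i (g i)) d).contains k
      = (d.contains k || xs.any (fun i => i == k)) := by
  induction xs with
  | nil => intro d k; simp
  | cons i rest ih =>
    intro d k
    rw [List.foldl_cons, ih, PySem.Dict.contains_insert]
    by_cases h1 : k = i
    · subst h1; simp
    · have hb : (k == i) = false := by simpa using h1
      have hb' : (i == k) = false := by
        simp only [beq_eq_false_iff_ne]; exact fun hh => h1 hh.symm
      simp [hb, hb', List.any_cons]

theorem foldl_insert_items (g : String → List String) (xs : List String) :
    ∀ (d : PySem.Dict String (List String)),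
    (d.items.map Prod.fst).Nodup →
    (((xs.foldl (fun d i => d.insert i (g i)) d).items.map Prod.fst).Nodup
      ∧ ∀ p ∈ (xs.foldl (fun d i => d.insert i (g i)) d).items,
          p ∈ d.items ∨ (p.1 ∈ xs ∧ p.2 = g p.1)) := by
  induction xs with
  | nil => intro d hnd; exact ⟨hnd, fun p hp => Or.inl hp⟩
  | cons i rest ih =>
    intro d hnd
    have hnd' : ((d.insert i (g i)).items.map Prod.fst).Nodup := by
      rw [map_fst_insert]
      by_cases hc : d.contains i = true
      · simpa [hc] using hnd
      · have hni : i ∉ d.items.map Prod.fst := by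
          intro hmem
          exact hc ((PySem.Dict.contains_iff_mem_keys d i).mpr (by simpa [PySem.Dict.keys] using hmem))
        simp [hc, List.nodup_append, hnd]
        intro a x hax ha
        exact hni (by rw [← ha]; exact List.mem_map.mpr ⟨(a, x), hax, rfl⟩)
    obtain ⟨h1, h2⟩ := ih (d.insert i (g i)) hnd'
    refine ⟨by simpa using h1, ?_⟩
    intro p hp
    rcases h2 p (by simpa using hp) with hin | ⟨hx, hv⟩
    · -- p came from d.insert i (g i)
      unfold PySem.Dict.insert at hin
      by_cases hc : d.contains i = true
      · rw [if_pos hc] at hin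
        rcases List.mem_map.mp hin with ⟨q, hq, hqe⟩
        by_cases hqi : (q.1 == i) = true
        · rw [if_pos hqi] at hqe
          right
          rw [← hqe]
          exact ⟨List.mem_cons_self .., rfl⟩
        · rw [if_neg hqi] at hqe
          exact Or.inl (hqe ▸ hq)
      · rw [if_neg hc] at hin
        rcases List.mem_append.mp hin with h | h
        · exact Or.inl h
        · right
          have : p = (i, g i) := by simpa using h
          simp [this]
    · exact Or.inr ⟨List.mem_cons_of_mem _ hx, hv⟩

theorem insert_items_rel (g : String → List String) (i : String)
    (d₁ d₂ : PySem.Dict String (List String))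
    (h : d₂.items = d₁.items.map (fun p => (p.1, g p.1))) :
    (d₂.insert i (g i)).items = (d₁.insert i ([] : List String)).items.map (fun p => (p.1, g p.1)) := by
  have hfst : d₂.items.map Prod.fst = d₁.items.map Prod.fst := by
    rw [h, List.map_map]; rfl
  have hc : d₂.contains i = d₁.contains i := contains_eq_of_map_fst hfst i
  unfold PySem.Dict.insert
  by_cases hc1 : d₁.contains i = true
  · rw [if_pos (hc ▸ hc1), if_pos hc1, h]
    simp only [List.map_map]
    apply List.map_congr_left
    intro p _
    by_cases hp : p.1 = i <;> simp [hp, Function.comp]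
  · rw [if_neg (by rw [hc]; exact hc1), if_neg hc1, h]
    simp

theorem foldl_insert_map (g : String → List String) (xs : List String) :
    ∀ (d₁ d₂ : PySem.Dict String (List String)),
    d₂.items = d₁.items.map (fun p => (p.1, g p.1)) →
    (xs.foldl (fun d i => d.insert i (g i)) d₂).items
      = (xs.foldl (fun d i => d.insert i []) d₁).items.map (fun p => (p.1, g p.1)) := by
  induction xs with
  | nil => intro d₁ d₂ h; simpa using h
  | cons i rest ih =>
    intro d₁ d₂ h
    rw [List.foldl_cons, List.foldl_cons]
    exact ih _ _ (insert_items_rel g i d₁ d₂ h)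

theorem outer_fold (interfaces : List String) (ti : PySem.Dict String (List String)) (ts : List String) :
    ∀ (d : PySem.Dict String (List String)) (n : List String),
    (d.items.map Prod.fst).Nodup →
    (∀ p ∈ d.items, PySem.Set.contains interfaces p.1 = true) →
    (∀ i, PySem.Set.contains interfaces i = true → d.contains i = true) →
    (ts.foldl
      (fun (acc : PySem.Dict String (List String) × List String) t =>
        let impls := (ti.getD t []).filter (fun i => PySem.Set.contains interfaces i)
        if impls.isEmpty then (acc.1, acc.2 ++ [t])
        else ((impls.foldl (fun d i => d.modify i [] (fun l => l ++ [t])) acc.1), acc.2))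
      (d, n))
    = (⟨d.items.map (fun p => (p.1, p.2 ++ bg_bucket ti ts p.1))⟩,
       n ++ ts.filter (fun t => !((ti.getD t []).any (fun i => PySem.Set.contains interfaces i)))) := by
  induction ts with
  | nil =>
    intro d n hnd hks hir
    simp [bg_bucket]
  | cons t ts ih =>
    intro d n hnd hks hir
    rw [List.foldl_cons]
    by_cases hemp : ((ti.getD t []).filter (fun i => PySem.Set.contains interfaces i)).isEmpty = true
    · have hnilf : (ti.getD t []).filter (fun i => PySem.Set.contains interfaces i) = [] :=
        List.isEmpty_iff.mp hemp
      have hall : ∀ i ∈ ti.getD t [], PySem.Set.contains interfaces i = false := by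
        intro i hi
        by_cases hci : PySem.Set.contains interfaces i = true
        · have : i ∈ ([] : List String) := hnilf ▸ List.mem_filter.mpr ⟨hi, hci⟩
          cases this
        · simpa using hci
      have hanyf : ((ti.getD t []).any (fun i => PySem.Set.contains interfaces i)) = false := by
        rw [List.any_eq_false]
        intro i hi
        rw [hall i hi]
        simp
      simp only [hemp, if_pos]
      rw [ih d (n ++ [t]) hnd hks hir]
      simp only [Prod.mk.injEq]
      refine ⟨?_, ?_⟩
      · congr 1
        apply List.map_congr_left
        intro p hp
        rw [bg_bucket_cons]
        have hfk : (ti.getD t []).filter (fun i => i == p.1) = [] := by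
          rw [List.filter_eq_nil_iff]
          intro i hi hbe
          have hip : i = p.1 := by simpa using hbe
          have h1 := hall i hi
          rw [hip, hks p hp] at h1
          simp at h1
        rw [hfk]
        simp
      · rw [List.filter_cons, if_pos (by rw [hanyf]; rfl)]
        simp
    · have hne : (ti.getD t []).filter (fun i => PySem.Set.contains interfaces i) ≠ [] := by
        intro hh; rw [hh] at hemp; exact hemp rfl
      have hanyt : ((ti.getD t []).any (fun i => PySem.Set.contains interfaces i)) = true := by
        rcases List.exists_mem_of_ne_nil _ hne with ⟨i, hi⟩
        rcases List.mem_filter.mp hi with ⟨hi1, hi2⟩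
        exact List.any_eq_true.mpr ⟨i, hi1, hi2⟩
      simp only [hemp, if_neg, Bool.not_eq_true]
      set impls := (ti.getD t []).filter (fun i => PySem.Set.contains interfaces i) with himpls
      have hcimp : ∀ i ∈ impls, d.contains i = true := by
        intro i hi
        exact hir i (List.mem_filter.mp hi).2
      have hdit : (impls.foldl (fun d i => d.modify i [] (fun l => l ++ [t])) d).items
          = d.items.map (fun p => (p.1, p.2 ++ ((impls.filter (fun i => i == p.1)).map (fun _ => t)))) :=
        inner_fold t impls d hnd hcimp
      set d' := impls.foldl (fun d i => d.modify i [] (fun l => l ++ [t])) d with hd'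
      have hfst : d'.items.map Prod.fst = d.items.map Prod.fst := by
        rw [hdit, List.map_map]; rfl
      have hnd' : (d'.items.map Prod.fst).Nodup := by rw [hfst]; exact hnd
      have hks' : ∀ p ∈ d'.items, PySem.Set.contains interfaces p.1 = true := by
        intro p hp
        rw [hdit] at hp
        rcases List.mem_map.mp hp with ⟨q, hq, hqe⟩
        have : p.1 = q.1 := by rw [← hqe]
        rw [this]; exact hks q hq
      have hir' : ∀ i, PySem.Set.contains interfaces i = true → d'.contains i = true := by
        intro i hi
        rw [contains_eq_of_map_fst hfst]
        exact hir i hi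
      rw [ih d' n hnd' hks' hir']
      simp only [Prod.mk.injEq]
      refine ⟨?_, ?_⟩
      · congr 1
        rw [hdit, List.map_map]
        apply List.map_congr_left
        intro p hp
        rw [bg_bucket_cons]
        have : impls.filter (fun i => i == p.1) = (ti.getD t []).filter (fun i => i == p.1) := by
          rw [himpls]
          exact filter_beq_filter interfaces (ti.getD t []) p.1 (hks p hp)
        simp [Function.comp, this, List.append_assoc]
      · rw [List.filter_cons, if_neg (by rw [hanyt]; decide)]

theorem assemble (interfaces : List String) (ti : PySem.Dict String (List String)) (ts : List String) :
    ((ts.foldl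
        (fun (acc : PySem.Dict String (List String) × List String) t =>
          let impls := (ti.getD t []).filter (fun i => PySem.Set.contains interfaces i)
          if impls.isEmpty then (acc.1, acc.2 ++ [t])
          else ((impls.foldl (fun d i => d.modify i [] (fun l => l ++ [t])) acc.1), acc.2))
        ((PySem.List.sorted interfaces (fun x => x) false).foldl
          (fun d iface => d.insert iface []) PySem.Dict.empty, ([] : List String))).1.items,
      (ts.foldl
        (fun (acc : PySem.Dict String (List String) × List String) t =>
          let impls := (ti.getD t []).filter (fun i => PySem.Set.contains interfaces i)
          if impls.isEmpty then (acc.1, acc.2 ++ [t])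
          else ((impls.foldl (fun d i => d.modify i [] (fun l => l ++ [t])) acc.1), acc.2))
        ((PySem.List.sorted interfaces (fun x => x) false).foldl
          (fun d iface => d.insert iface []) PySem.Dict.empty, ([] : List String))).2)
    = (((PySem.List.sorted interfaces (fun x => x) false).foldl
          (fun d iface => d.insert iface (bg_bucket ti ts iface)) PySem.Dict.empty).items,
       ts.filter (fun t => !((ti.getD t []).any (fun i => PySem.Set.contains interfaces i)))) := by
  have hnd0 : ((PySem.Dict.empty : PySem.Dict String (List String)).items.map Prod.fst).Nodup := by
    simp [PySem.Dict.empty]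
  obtain ⟨hnd, hmem⟩ :=
    foldl_insert_items (fun _ => []) (PySem.List.sorted interfaces (fun x => x) false)
      PySem.Dict.empty hnd0
  have hks : ∀ p ∈ ((PySem.List.sorted interfaces (fun x => x) false).foldl
      (fun d iface => d.insert iface ([] : List String)) PySem.Dict.empty).items,
      PySem.Set.contains interfaces p.1 = true := by
    intro p hp
    rcases hmem p hp with h | ⟨hx, _⟩
    · simp [PySem.Dict.empty] at h
    · have hm : p.1 ∈ interfaces := (PySem.List.mem_sorted interfaces (fun x => x) false p.1).mp hx
      simp [PySem.Set.contains, hm]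
  have hir : ∀ i, PySem.Set.contains interfaces i = true →
      ((PySem.List.sorted interfaces (fun x => x) false).foldl
        (fun d iface => d.insert iface ([] : List String)) PySem.Dict.empty).contains i = true := by
    intro i hi
    rw [contains_foldl_insert (fun _ => [])]
    have hm : i ∈ interfaces := by
      simpa [PySem.Set.contains] using hi
    have hx : i ∈ PySem.List.sorted interfaces (fun x => x) false :=
      (PySem.List.mem_sorted interfaces (fun x => x) false i).mpr hm
    have hany : (PySem.List.sorted interfaces (fun x => x) false).any (fun j => j == i) = true :=
      List.any_eq_true.mpr ⟨i, hx, by simp⟩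
    simp [hany]
  rw [outer_fold interfaces ti ts _ [] hnd hks hir]
  simp only [List.nil_append, Prod.mk.injEq]
  refine ⟨?_, trivial⟩
  rw [foldl_insert_map (bg_bucket ti ts) (PySem.List.sorted interfaces (fun x => x) false)
    PySem.Dict.empty PySem.Dict.empty (by rfl)]
  apply List.map_congr_left
  intro p hp
  rcases hmem p hp with h | ⟨_, hv⟩
  · simp [PySem.Dict.empty] at h
  · rw [hv]
    simp

-- ===== VERDICT (by name: the statement is the Claim_ definition above) =====
theorem build_groupings_spec : Claim_equal_build_groupings := by
  intro interfaces obj_types type_interfaces _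
  unfold Spec_build_groupings build_groupings build_groupings_alt
  have hts : ((PySem.Dict.ofList obj_types).keys.filter (fun t => type_allowed t))
      = ((PySem.Dict.ofList obj_types).keys.filter (fun t =>
          !(PySem.Set.contains (PySem.Set.ofList ["PageInfo"]) t)
            && !(["Connection", "Edge"].any (fun suf => PySem.Str.endswith t suf)))) :=
    List.filter_congr (fun x _ => type_allowed_eq x)
  dsimp only
  rw [hts]
  exact assemble interfaces (PySem.Dict.ofList type_interfaces)
    (PySem.List.sorted ((PySem.Dict.ofList obj_types).keys.filter (fun t =>
      !(PySem.Set.contains (PySem.Set.ofList ["PageInfo"]) t)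
        && !(["Connection", "Edge"].any (fun suf => PySem.Str.endswith t suf)))) (fun x => x) false)
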